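-- pv_equiv track=rewrite | github.com/paula-gisbert/ADS-Coding-Assessment | question_4_genai_cda/question4_agent.py | parse_question
-- ===== SOURCE A (Python) =====
-- def parse_question(question):
--     """Step 2: LLM Implementation (Mocked)."""
--     q_upper = question.upper()
--     if any(word in q_upper for word in ["SEVERITY", "INTENSITY", "MODERATE", "MILD", "SEVERE"]):
--         target_col, filter_val = "AESEV", next((v for v in ["MILD", "MODERATE", "SEVERE"] if v in q_upper), "MODERATE")
--     elif any(word in q_upper for word in ["HEADACHE", "NAUSEA", "DIZZINESS"]):
--         target_col, filter_val = "AETERM", next((v for v in ["HEADACHE", "NAUSEA", "DIZZINESS"] if v in q_upper), "HEADACHE")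
--     elif any(word in q_upper for word in ["CARDIAC", "SKIN", "NERVOUS"]):
--         target_col = "AESOC"
--         if "CARDIAC" in q_upper: filter_val = "CARDIAC DISORDERS"
--         elif "SKIN" in q_upper: filter_val = "SKIN AND SUBCUTANEOUS TISSUE DISORDERS"
--         else: filter_val = "NERVOUS SYSTEM DISORDERS"
--     else:
--         target_col, filter_val = "AETERM", "UNKNOWN"
--
--     return {"target_column": target_col, "filter_value": filter_val}
-- ===== SOURCE B (Python) =====
-- KEYWORDS = ["SEVERITY", "INTENSITY", "MODERATE", "MILD", "SEVERE",
--             "HEADACHE", "NAUSEA", "DIZZINESS", "CARDIAC", "SKIN", "NERVOUS"]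
--
--
-- def _scan(q):
--     """One left-to-right pass over q: at each position, record every keyword
--     that starts there. Returns the set of keywords occurring in q."""
--     found = set()
--     for i in range(len(q)):
--         for w in KEYWORDS:
--             if q[i:i + len(w)] == w:
--                 found.add(w)
--     return found
--
--
-- def _decide(found):
--     """Pure decision on the set of present keywords (no further string work)."""
--     if found & {"SEVERITY", "INTENSITY", "MODERATE", "MILD", "SEVERE"}:
--         col = "AESEV"
--         val = next((v for v in ["MILD", "MODERATE", "SEVERE"] if v in found), "MODERATE")
--     elif found & {"HEADACHE", "NAUSEA", "DIZZINESS"}: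
--         col = "AETERM"
--         val = next((v for v in ["HEADACHE", "NAUSEA", "DIZZINESS"] if v in found), "HEADACHE")
--     elif "CARDIAC" in found:
--         col, val = "AESOC", "CARDIAC DISORDERS"
--     elif "SKIN" in found:
--         col, val = "AESOC", "SKIN AND SUBCUTANEOUS TISSUE DISORDERS"
--     elif "NERVOUS" in found:
--         col, val = "AESOC", "NERVOUS SYSTEM DISORDERS"
--     else:
--         col, val = "AETERM", "UNKNOWN"
--     return {"target_column": col, "filter_value": val}
--
--
-- def parse_question(question):
--     return _decide(_scan(question.upper()))
-- ===== Notes on version B (the rewrite author's own statement) =====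
-- stated objective: alternative
-- what changed: A answers by running a chain of independent whole-string substring searches branch by branch; B instead makes one positional scan of the uppercased question that collects the set of all keywords present (comparing the slice starting at each position against each keyword), then resolves column and filter value by a pure decision on that set with no further string work.
import Mathlib
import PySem

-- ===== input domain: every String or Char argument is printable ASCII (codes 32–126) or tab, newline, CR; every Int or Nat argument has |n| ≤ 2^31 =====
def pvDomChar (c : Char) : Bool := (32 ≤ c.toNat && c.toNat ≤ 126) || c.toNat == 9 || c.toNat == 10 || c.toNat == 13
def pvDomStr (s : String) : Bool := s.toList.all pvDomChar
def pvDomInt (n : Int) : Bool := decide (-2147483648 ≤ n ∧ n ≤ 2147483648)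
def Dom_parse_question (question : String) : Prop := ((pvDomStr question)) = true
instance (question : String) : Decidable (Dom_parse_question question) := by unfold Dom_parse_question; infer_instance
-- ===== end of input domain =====

-- B replaces A's repeated substring searches by a single positional scan of the
-- uppercased question that collects the set of keywords present, followed by a pure
-- decision on that set (objective: alternative); return values are identical.

-- ===== PORT A =====
def parse_question (question : String) : List (String × String) :=
  let q_upper := PySem.Str.upper question
  if (["SEVERITY", "INTENSITY", "MODERATE", "MILD", "SEVERE"].any
        (fun word => PySem.Str.isIn word q_upper)) then
    let filter_val :=
      ((["MILD", "MODERATE", "SEVERE"].find? (fun v => PySem.Str.isIn v q_upper)).getD "MODERATE")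
    [("target_column", "AESEV"), ("filter_value", filter_val)]
  else if (["HEADACHE", "NAUSEA", "DIZZINESS"].any
        (fun word => PySem.Str.isIn word q_upper)) then
    let filter_val :=
      ((["HEADACHE", "NAUSEA", "DIZZINESS"].find? (fun v => PySem.Str.isIn v q_upper)).getD "HEADACHE")
    [("target_column", "AETERM"), ("filter_value", filter_val)]
  else if (["CARDIAC", "SKIN", "NERVOUS"].any
        (fun word => PySem.Str.isIn word q_upper)) then
    let filter_val :=
      if PySem.Str.isIn "CARDIAC" q_upper then "CARDIAC DISORDERS"
      else if PySem.Str.isIn "SKIN" q_upper then "SKIN AND SUBCUTANEOUS TISSUE DISORDERS"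
      else "NERVOUS SYSTEM DISORDERS"
    [("target_column", "AESOC"), ("filter_value", filter_val)]
  else
    [("target_column", "AETERM"), ("filter_value", "UNKNOWN")]

-- ===== PORT B =====
def pvKeywords : List String :=
  ["SEVERITY", "INTENSITY", "MODERATE", "MILD", "SEVERE",
   "HEADACHE", "NAUSEA", "DIZZINESS", "CARDIAC", "SKIN", "NERVOUS"]

-- _scan of Source B: one pass over positions; at each i record every keyword w with q[i:i+len(w)] == w
def pvScan (q : List Char) : PySem.Set String :=
  (List.range q.length).foldl (fun found (i : Nat) =>
    pvKeywords.foldl (fun found w =>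
      if PySem.List.slice q (some (i : Int)) (some ((i : Int) + ((w.toList.length : Nat) : Int))) == w.toList
      then PySem.Set.add found w else found) found)
    PySem.Set.empty

-- _decide of Source B: pure decision on the set of present keywords
def pvDecide (found : PySem.Set String) : List (String × String) :=
  let cv : String × String :=
    if PySem.Set.inter found (PySem.Set.ofList ["SEVERITY", "INTENSITY", "MODERATE", "MILD", "SEVERE"]) ≠ [] then
      ("AESEV", ((["MILD", "MODERATE", "SEVERE"].find? (fun v => PySem.Set.contains found v)).getD "MODERATE"))
    else if PySem.Set.inter found (PySem.Set.ofList ["HEADACHE", "NAUSEA", "DIZZINESS"]) ≠ [] then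
      ("AETERM", ((["HEADACHE", "NAUSEA", "DIZZINESS"].find? (fun v => PySem.Set.contains found v)).getD "HEADACHE"))
    else if PySem.Set.contains found "CARDIAC" then ("AESOC", "CARDIAC DISORDERS")
    else if PySem.Set.contains found "SKIN" then ("AESOC", "SKIN AND SUBCUTANEOUS TISSUE DISORDERS")
    else if PySem.Set.contains found "NERVOUS" then ("AESOC", "NERVOUS SYSTEM DISORDERS")
    else ("AETERM", "UNKNOWN")
  [("target_column", cv.1), ("filter_value", cv.2)]

def parse_question_alt (question : String) : List (String × String) :=
  pvDecide (pvScan (PySem.Str.upper question).toList)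

-- ===== PRECONDITION & SPEC =====
def Spec_parse_question (question : String) (out : List (String × String)) : Prop := out = parse_question_alt question
instance (question : String) (out : List (String × String)) : Decidable (Spec_parse_question question out) := by unfold Spec_parse_question; infer_instance

-- ===== CLAIM =====
def Claim_equal_parse_question : Prop := ∀ (question : String), Dom_parse_question question → Spec_parse_question question (parse_question question)

-- ===== LEMMAS AND PROOFS =====

-- membership after the inner fold over the keyword list
theorem pv_mem_inner (q : List Char) (i : Nat) (ks : List String) (found : PySem.Set String) (w : String) :
    w ∈ ks.foldl (fun found w =>
      if PySem.List.slice q (some (i : Int)) (some ((i : Int) + ((w.toList.length : Nat) : Int))) == w.toList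
      then PySem.Set.add found w else found) found ↔
    w ∈ found ∨ (w ∈ ks ∧ (q.drop i).take w.toList.length = w.toList) := by
  induction ks generalizing found with
  | nil => simp
  | cons k ks ih =>
    simp only [List.foldl_cons, ih, List.mem_cons]
    rw [PySem.List.slice_natCast_add]
    by_cases h : (q.drop i).take k.toList.length = k.toList
    · simp only [h, beq_self_eq_true, if_true, PySem.Set.mem_add]
      constructor
      · rintro (⟨hf | rfl⟩ | h2)
        · exact Or.inl hf
        · exact Or.inr ⟨Or.inl rfl, h⟩
        · exact Or.inr ⟨Or.inr h2.1, h2.2⟩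
      · rintro (hf | ⟨(rfl | hk), hm⟩)
        · exact Or.inl (Or.inl hf)
        · exact Or.inl (Or.inr rfl)
        · exact Or.inr ⟨hk, hm⟩
    · have : ((List.take k.toList.length (List.drop i q)) == k.toList) = false := by
        simpa using h
      simp only [this]
      constructor
      · rintro (hf | h2)
        · exact Or.inl hf
        · exact Or.inr ⟨Or.inr h2.1, h2.2⟩
      · rintro (hf | ⟨(rfl | hk), hm⟩)
        · exact Or.inl hf
        · exact absurd hm h
        · exact Or.inr ⟨hk, hm⟩

-- membership after the outer fold over a list of positions
theorem pv_mem_outer (q : List Char) (is : List Nat) (found : PySem.Set String) (w : String) :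
    w ∈ is.foldl (fun found (i : Nat) =>
      pvKeywords.foldl (fun found w =>
        if PySem.List.slice q (some (i : Int)) (some ((i : Int) + ((w.toList.length : Nat) : Int))) == w.toList
        then PySem.Set.add found w else found) found) found ↔
    w ∈ found ∨ (w ∈ pvKeywords ∧ ∃ i ∈ is, (q.drop i).take w.toList.length = w.toList) := by
  induction is generalizing found with
  | nil => simp
  | cons j is ih =>
    simp only [List.foldl_cons, ih, pv_mem_inner, List.mem_cons]
    constructor
    · rintro ((hf | ⟨hk, hm⟩) | ⟨hk, i, hi, hm⟩)
      · exact Or.inl hf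
      · exact Or.inr ⟨hk, j, Or.inl rfl, hm⟩
      · exact Or.inr ⟨hk, i, Or.inr hi, hm⟩
    · rintro (hf | ⟨hk, i, (rfl | hi), hm⟩)
      · exact Or.inl (Or.inl hf)
      · exact Or.inl (Or.inr ⟨hk, hm⟩)
      · exact Or.inr ⟨hk, i, hi, hm⟩

theorem pv_mem_scan (q : List Char) (w : String) :
    w ∈ pvScan q ↔ w ∈ pvKeywords ∧ ∃ i < q.length, (q.drop i).take w.toList.length = w.toList := by
  unfold pvScan
  rw [pv_mem_outer]
  simp [PySem.Set.empty, List.mem_range]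

theorem pv_exists_match_iff (q : List Char) (w : String) (hw : w.toList ≠ []) :
    (∃ i < q.length, (q.drop i).take w.toList.length = w.toList) ↔
      PySem.Chars.isIn w.toList q = true := by
  rw [PySem.Chars.isIn_iff_infix]
  constructor
  · rintro ⟨i, _, hm⟩
    have hp : w.toList <+: q.drop i := List.prefix_iff_eq_take.mpr hm.symm
    exact hp.isInfix.trans (List.drop_suffix i q).isInfix
  · rintro ⟨s, t, rfl⟩
    have hp : w.toList <+: (s ++ w.toList ++ t).drop s.length := by
      rw [List.append_assoc, List.drop_left]
      exact List.prefix_append _ _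
    refine ⟨s.length, ?_, (List.prefix_iff_eq_take.mp hp).symm⟩
    have hwpos : 0 < w.toList.length := List.length_pos_iff.mpr hw
    simp only [List.length_append]
    omega

theorem pv_contains_scan (q : List Char) (w : String)
    (h1 : w ∈ pvKeywords) (h2 : w.toList ≠ []) :
    PySem.Set.contains (pvScan q) w = PySem.Chars.isIn w.toList q := by
  rw [Bool.eq_iff_iff, PySem.Set.contains_iff, pv_mem_scan, pv_exists_match_iff q w h2]
  simp [h1]

-- a nonempty intersection of found with a literal set = one of its members is in found
theorem pv_inter_ne_nil (s t : PySem.Set String) :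
    (PySem.Set.inter s t ≠ []) ↔ ∃ x ∈ t, x ∈ s := by
  constructor
  · intro h
    obtain ⟨x, hx⟩ := List.exists_mem_of_ne_nil _ h
    have := (PySem.Set.mem_inter s t x).mp hx
    exact ⟨x, this.2, this.1⟩
  · rintro ⟨x, hxt, hxs⟩ hnil
    have : x ∈ PySem.Set.inter s t := (PySem.Set.mem_inter s t x).mpr ⟨hxs, hxt⟩
    simp [hnil] at this

-- ===== VERDICT =====
set_option maxHeartbeats 2000000 in
theorem parse_question_spec : Claim_equal_parse_question := by
  intro question _
  unfold Spec_parse_question parse_question parse_question_alt pvDecide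
  have hc : ∀ w ∈ pvKeywords,
      PySem.Set.contains (pvScan (PySem.Str.upper question).toList) w
        = PySem.Chars.isIn w.toList (PySem.Str.upper question).toList := by
    intro w hw
    refine pv_contains_scan _ w hw ?_
    fin_cases hw <;> decide
  have hm : ∀ w ∈ pvKeywords,
      (w ∈ pvScan (PySem.Str.upper question).toList)
        ↔ PySem.Chars.isIn w.toList (PySem.Str.upper question).toList = true := by
    intro w hw
    rw [← hc w hw, PySem.Set.contains_iff]
  simp only [PySem.Str.isIn, List.any_cons, List.any_nil, Bool.or_false, List.find?,
    pv_inter_ne_nil, PySem.Set.mem_ofList, List.mem_cons, List.not_mem_nil]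
  rw [hc "MILD" (by decide), hc "MODERATE" (by decide), hc "SEVERE" (by decide),
      hc "HEADACHE" (by decide), hc "NAUSEA" (by decide), hc "DIZZINESS" (by decide),
      hc "CARDIAC" (by decide), hc "SKIN" (by decide), hc "NERVOUS" (by decide)]
  simp only [ne_eq, pv_inter_ne_nil, PySem.Set.mem_ofList, List.mem_cons, List.not_mem_nil,
    or_false, exists_eq_or_imp, exists_eq_left, Bool.or_eq_true,
    hm "SEVERITY" (by decide), hm "INTENSITY" (by decide), hm "MODERATE" (by decide),
    hm "MILD" (by decide), hm "SEVERE" (by decide), hm "HEADACHE" (by decide),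
    hm "NAUSEA" (by decide), hm "DIZZINESS" (by decide)]
  split_ifs <;> simp_all
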